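-- pv_equiv track=rewrite | github.com/YotsuBotfds/senku-app | scripts/compare_contextual_shadow_retrieval.py | expected_rank
-- ===== SOURCE A (Python) =====
-- def expected_rank(candidates: list[str], expected_ids: list[str]) -> int | None:
--     expected = set(expected_ids)
--     if not candidates or not expected:
--         return None
--     for index, guide_id in enumerate(candidates, start=1):
--         if guide_id in expected:
--             return index
--     return None
-- ===== SOURCE B (Python) =====
-- def expected_rank(candidates: list[str], expected_ids: list[str]) -> int | None:
--     pos = {}
--     for rank, gid in enumerate(candidates, start=1):
--         pos.setdefault(gid, rank)
--     ranks = [pos[e] for e in expected_ids if e in pos]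
--     return min(ranks) if ranks else None
-- ===== Notes on version B (the rewrite author's own statement) =====
-- stated objective: alternative
-- what changed: Instead of scanning candidates and short-circuiting on the first membership hit in the expected set, B builds a first-position index of the candidates once and returns the minimum indexed position found among the expected ids (None if none).
import Mathlib
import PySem

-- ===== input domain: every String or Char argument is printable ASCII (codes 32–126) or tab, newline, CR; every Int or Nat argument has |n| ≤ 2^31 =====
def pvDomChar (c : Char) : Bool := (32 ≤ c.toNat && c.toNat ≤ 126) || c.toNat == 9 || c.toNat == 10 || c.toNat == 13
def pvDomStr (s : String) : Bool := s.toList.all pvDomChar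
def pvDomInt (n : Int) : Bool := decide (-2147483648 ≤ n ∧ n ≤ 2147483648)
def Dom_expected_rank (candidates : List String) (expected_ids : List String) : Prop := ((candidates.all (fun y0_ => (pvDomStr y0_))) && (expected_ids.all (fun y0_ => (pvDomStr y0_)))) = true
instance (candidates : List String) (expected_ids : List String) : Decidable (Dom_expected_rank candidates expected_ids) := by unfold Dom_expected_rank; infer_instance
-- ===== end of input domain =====

-- B indexes each candidate's first 1-based position in a dict once, then takes the min of the
-- positions of the expected ids (alternative decomposition; same asymptotic cost as A).


-- ===== PORT A =====
-- 'for index, guide_id in enumerate(candidates, start=1): if guide_id in expected: return index'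
def erScan (expected : List String) : List String → Int → Option Int
  | [], _ => none
  | g :: rest, i => if g ∈ expected then some i else erScan expected rest (i + 1)

def expected_rank (candidates : List String) (expected_ids : List String) : Option Int :=
  let expected := PySem.Set.ofList expected_ids
  if candidates = [] ∨ expected = [] then none
  else erScan expected candidates 1

-- ===== PORT B =====
-- 'for rank, gid in enumerate(candidates, start=1): pos.setdefault(gid, rank)'
def erBuild : List String → Int → PySem.Dict String Int → PySem.Dict String Int
  | [], _, d => d
  | g :: rest, i, d => erBuild rest (i + 1) (d.setdefault g i)

def expected_rank_alt (candidates : List String) (expected_ids : List String) : Option Int :=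
  let pos := erBuild candidates 1 PySem.Dict.empty
  let ranks := expected_ids.filterMap (fun e => pos.get? e)
  if ranks = [] then none else PySem.List.min? ranks (fun x => x)

-- ===== PRECONDITION & SPEC =====
def Spec_expected_rank (candidates : List String) (expected_ids : List String) (out : Option Int) : Prop := out = expected_rank_alt candidates expected_ids
instance (candidates : List String) (expected_ids : List String) (out : Option Int) : Decidable (Spec_expected_rank candidates expected_ids out) := by unfold Spec_expected_rank; infer_instance

-- ===== CLAIM (what is proved, stated in full; the proofs are below) =====
def Claim_equal_expected_rank : Prop := ∀ (candidates : List String) (expected_ids : List String), Dom_expected_rank candidates expected_ids → Spec_expected_rank candidates expected_ids (expected_rank candidates expected_ids)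

-- ===== LEMMAS AND PROOFS =====

-- first 1-based-from-i position of k in the list (specification device for both ports)
def fpos : List String → Int → String → Option Int
  | [], _, _ => none
  | g :: rest, i, k => if g = k then some i else fpos rest (i + 1) k

theorem get?_setdefault (d : PySem.Dict String Int) (g k : String) (i : Int) :
    (d.setdefault g i).get? k = if g = k then some ((d.get? g).getD i) else d.get? k := by
  by_cases hc : d.contains g
  · rw [PySem.Dict.setdefault_of_contains d i hc]
    split_ifs with h
    · subst h
      cases hv : d.get? g with
      | none =>
        rw [PySem.Dict.get?_eq_none_iff_contains] at hv
        rw [hv] at hc; exact absurd hc (by simp)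
      | some v => simp [hv]
    · rfl
  · rw [PySem.Dict.setdefault_of_not_contains d i (by simpa using hc)]
    have hn : d.get? g = none := by
      rw [PySem.Dict.get?_eq_none_iff_contains]; simpa using hc
    split_ifs with h
    · subst h; simp [PySem.Dict.get?_insert_self, hn]
    · exact PySem.Dict.get?_insert_of_ne d i (fun hk => h hk.symm)

theorem get?_erBuild (c : List String) (i : Int) (d : PySem.Dict String Int) (k : String) :
    (erBuild c i d).get? k = ((d.get? k).orElse (fun _ => fpos c i k)) := by
  induction c generalizing i d with
  | nil => cases h : d.get? k <;> simp [erBuild, fpos, h]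
  | cons g rest ih =>
    simp only [erBuild, fpos, ih, get?_setdefault]
    by_cases h : g = k
    · subst h; rw [if_pos rfl]
      cases h : d.get? g <;> simp [h]
    · simp [h]

theorem fpos_lb (c : List String) (i : Int) (k : String) (v : Int)
    (h : fpos c i k = some v) : i ≤ v := by
  induction c generalizing i with
  | nil => simp [fpos] at h
  | cons g rest ih =>
    simp only [fpos] at h
    split_ifs at h with hg
    · injection h with h; omega
    · have := ih (i + 1) h; omega

theorem min?_eq_of_mem (l : List Int) (i : Int) (hm : i ∈ l) (hlb : ∀ x ∈ l, i ≤ x) :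
    PySem.List.min? l (fun x => x) = some i := by
  cases hmin : PySem.List.min? l (fun x => x) with
  | none =>
    rw [PySem.List.min?_eq_none_iff] at hmin
    subst hmin; simp at hm
  | some m =>
    have h1 : m ∈ l := PySem.List.min?_mem hmin
    have h2 : i ≤ m := hlb m h1
    have h3 : m ≤ i := PySem.List.min?_isMin hmin i hm
    simp [le_antisymm h3 h2]

theorem erScan_eq_min (E c : List String) (i : Int) :
    erScan E c i = PySem.List.min? (E.filterMap (fun e => fpos c i e)) (fun x => x) := by
  induction c generalizing i with
  | nil =>
    have : E.filterMap (fun e => fpos ([] : List String) i e) = [] := by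
      simp [fpos]
    simp [erScan, this, PySem.List.min?]
  | cons g rest ih =>
    simp only [erScan]
    by_cases hg : g ∈ E
    · rw [if_pos hg]
      refine (min?_eq_of_mem _ i ?_ ?_).symm
      · exact List.mem_filterMap.mpr ⟨g, hg, by simp [fpos]⟩
      · intro x hx
        rcases List.mem_filterMap.mp hx with ⟨e, _, he⟩
        simp only [fpos] at he
        split_ifs at he with h
        · injection he with he; omega
        · have := fpos_lb rest (i + 1) e x he; omega
    · rw [if_neg hg, ih]
      congr 1
      apply List.filterMap_congr
      intro e he
      have hne : g ≠ e := fun h => hg (h ▸ he)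
      simp [fpos, hne]

theorem erScan_ofList (E c : List String) (i : Int) :
    erScan (PySem.Set.ofList E) c i = erScan E c i := by
  induction c generalizing i with
  | nil => rfl
  | cons g rest ih => simp [erScan, PySem.Set.mem_ofList, ih]

theorem ofList_ne_nil (E : List String) (h : E ≠ []) : PySem.Set.ofList E ≠ [] := by
  cases E with
  | nil => exact absurd rfl h
  | cons e rest =>
    intro hn
    have : e ∈ PySem.Set.ofList (e :: rest) := by simp [PySem.Set.mem_ofList]
    rw [hn] at this; simp at this

-- ===== VERDICT (by name: the statement is the Claim_ definition above) =====
theorem expected_rank_spec : Claim_equal_expected_rank := by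
  intro candidates E _
  unfold Spec_expected_rank expected_rank expected_rank_alt
  have hranks : E.filterMap (fun e => (erBuild candidates 1 PySem.Dict.empty).get? e)
      = E.filterMap (fun e => fpos candidates 1 e) := by
    apply List.filterMap_congr
    intro e _
    rw [get?_erBuild]
    simp [PySem.Dict.get?_empty]
  simp only [hranks]
  by_cases hc : candidates = []
  · subst hc
    have : E.filterMap (fun e => fpos ([] : List String) 1 e) = [] := by simp [fpos]
    simp [this]
  · by_cases hE : E = []
    · subst hE; simp
    · rw [if_neg (not_or.mpr ⟨hc, ofList_ne_nil E hE⟩)]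
      rw [erScan_ofList, erScan_eq_min]
      split_ifs with h
      · rw [h]; rfl
      · rfl
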